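-- pv_equiv track=rewrite | github.com/VishvaMangukiya/Basic-python-tasks | More Python Programs/sumOfEvenFactors.py | sum_of_even_factors
-- ===== SOURCE A (Python) =====
-- def sum_of_even_factors(n):
--     if n <= 0:
--         return 0
--
--     sum_even = 0
--
--     for i in range(1, int(n**0.5) + 1):
--         if n % i == 0:
--             if i % 2 == 0:
--                 sum_even += i
--             if (n // i) % 2 == 0 and (n // i) != i:
--                 sum_even += n // i
--
--     return sum_even
-- ===== SOURCE B (Python) =====
-- def sum_of_even_factors(n):
--     if n <= 0 or n % 2 != 0:
--         return 0
--     half = n // 2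
--     total = 0
--     for i in range(1, int(half**0.5) + 1):
--         if half % i == 0:
--             total += i
--             if half // i != i:
--                 total += half // i
--     return 2 * total
-- ===== Notes on version B (the rewrite author's own statement) =====
-- stated objective: alternative
-- what changed: B reduces the problem number-theoretically: for even n the even divisors are exactly the doubled divisors of half of n, so B doubles the plain divisor-sum of n//2 (and returns zero for odd or nonpositive n), instead of A's even-filtered paired scan over the divisors of n itself.
import Mathlib
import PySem

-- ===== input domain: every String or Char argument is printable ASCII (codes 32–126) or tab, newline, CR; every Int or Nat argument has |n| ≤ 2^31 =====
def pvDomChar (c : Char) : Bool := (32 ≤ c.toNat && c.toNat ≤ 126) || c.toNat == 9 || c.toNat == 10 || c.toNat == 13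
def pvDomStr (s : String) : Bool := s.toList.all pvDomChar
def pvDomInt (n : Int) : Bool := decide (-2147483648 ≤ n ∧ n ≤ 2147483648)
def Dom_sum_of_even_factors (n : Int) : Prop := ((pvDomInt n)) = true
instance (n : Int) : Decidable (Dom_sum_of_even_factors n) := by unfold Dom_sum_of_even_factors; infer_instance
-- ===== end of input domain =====

-- B uses the identity sum-of-even-divisors(n) = 2·σ(n//2) for even n (0 for odd n): a plain divisor-sum
-- loop over n//2 with no parity tests, instead of A's even-filtered paired scan over the divisors of n.

-- ===== PORT A =====
-- int(n**0.5): for 1 ≤ n ≤ 2^31 (the stated domain) the float expression equals the integer square root, ported as Nat.sqrt.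
def sum_of_even_factors (n : Int) : Int :=
  if n ≤ 0 then 0
  else
    (PySem.List.pyRange 1 ((Nat.sqrt n.toNat : Int) + 1) 1).foldl
      (fun sum_even i =>
        if PySem.Int.mod n i = 0 then
          let sum_even := if PySem.Int.mod i 2 = 0 then sum_even + i else sum_even
          if PySem.Int.mod (PySem.Int.floordiv n i) 2 = 0 ∧ PySem.Int.floordiv n i ≠ i
          then sum_even + PySem.Int.floordiv n i else sum_even
        else sum_even) 0

-- ===== PORT B =====
-- int(half**0.5): exact on the stated domain (half ≤ 2^30), ported as Nat.sqrt.
def sum_of_even_factors_alt (n : Int) : Int :=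
  if n ≤ 0 ∨ PySem.Int.mod n 2 ≠ 0 then 0
  else
    let half := PySem.Int.floordiv n 2
    2 * (PySem.List.pyRange 1 ((Nat.sqrt half.toNat : Int) + 1) 1).foldl
      (fun total i =>
        if PySem.Int.mod half i = 0 then
          let total := total + i
          if PySem.Int.floordiv half i ≠ i then total + PySem.Int.floordiv half i else total
        else total) 0

-- ===== PRECONDITION & SPEC =====
def Spec_sum_of_even_factors (n : Int) (out : Int) : Prop := out = sum_of_even_factors_alt n
instance (n : Int) (out : Int) : Decidable (Spec_sum_of_even_factors n out) := by unfold Spec_sum_of_even_factors; infer_instance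

-- ===== CLAIM (what is proved, stated in full; the proofs are below) =====
def Claim_equal_sum_of_even_factors : Prop := ∀ (n : Int), Dom_sum_of_even_factors n → Spec_sum_of_even_factors n (sum_of_even_factors n)

-- ===== LEMMAS AND PROOFS =====

-- the value a divisor d contributes to A's sum
def pvHEv (d : ℕ) : ℕ := if d % 2 = 0 then d else 0

-- one iteration of A's loop at index i, as a pure value (ℕ level)
def pvATerm (m i : ℕ) : ℕ :=
  if m % i = 0 then
    (if i % 2 = 0 then i else 0) +
    (if (m / i) % 2 = 0 ∧ m / i ≠ i then m / i else 0)
  else 0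

-- one iteration of B's loop at index i over h = m / 2, as a pure value (ℕ level)
def pvBTerm (h i : ℕ) : ℕ :=
  if h % i = 0 then i + (if h / i ≠ i then h / i else 0) else 0

theorem pv_cast_mod (a b : ℕ) : PySem.Int.mod (a : Int) (b : Int) = ((a % b : ℕ) : Int) := by
  simp [PySem.Int.mod, Int.fmod_eq_emod]

theorem pv_cast_div (a b : ℕ) : PySem.Int.floordiv (a : Int) (b : Int) = ((a / b : ℕ) : Int) := by
  simp [PySem.Int.floordiv, Int.fdiv_eq_ediv]

theorem pv_mod_eq_zero (a b : ℕ) (h : b ∣ a) : a % b = 0 := by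
  obtain ⟨c, rfl⟩ := h; exact Nat.mul_mod_right b c

theorem pv_div_dvd (a b : ℕ) (h : b ∣ a) : a / b ∣ a := by
  obtain ⟨c, rfl⟩ := h
  rcases Nat.eq_zero_or_pos b with hb | hb
  · subst hb; simp
  · rw [Nat.mul_div_cancel_left c hb]; exact dvd_mul_left c b

theorem pv_range_shift (s : ℕ) (f : ℕ → ℕ) :
    ∑ k ∈ Finset.range s, f (k + 1) = ∑ i ∈ Finset.Icc 1 s, f i := by
  refine Finset.sum_nbij' (fun k => k + 1) (fun i => i - 1) ?_ ?_ ?_ ?_ ?_ <;>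
    intro a ha <;> simp only [Finset.mem_range, Finset.mem_Icc] at * <;> omega

-- a divisor larger than √m is mapped below √m by d ↦ m / d
theorem pv_div_le_sqrt (m d : ℕ) (hdvd : d ∣ m) (hs : Nat.sqrt m < d) :
    m / d ≤ Nat.sqrt m := by
  by_contra hc
  have h1 : m < (Nat.sqrt m + 1) * (Nat.sqrt m + 1) := by
    have := Nat.lt_succ_sqrt' m
    simpa [pow_two, Nat.succ_eq_add_one] using this
  have h2 : d * (m / d) = m := Nat.mul_div_cancel' hdvd
  have h3 : (Nat.sqrt m + 1) * (Nat.sqrt m + 1) ≤ d * (m / d) :=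
    Nat.mul_le_mul (by omega) (by omega)
  omega

-- a divisor i ≤ √m whose cofactor differs from i has its cofactor above √m
theorem pv_sqrt_lt_div (m i : ℕ) (hdvd : i ∣ m) (hi : 0 < i)
    (hle : i ≤ Nat.sqrt m) (hne : m / i ≠ i) : Nat.sqrt m < m / i := by
  have hsl : Nat.sqrt m * Nat.sqrt m ≤ m := by
    have := Nat.sqrt_le' m; simpa [pow_two] using this
  have him : i * (m / i) = m := Nat.mul_div_cancel' hdvd
  have hge : i ≤ m / i := by
    rw [Nat.le_div_iff_mul_le hi]
    calc i * i ≤ Nat.sqrt m * Nat.sqrt m := Nat.mul_le_mul hle hle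
      _ ≤ m := hsl
  have hlt : i < m / i := lt_of_le_of_ne hge (fun h => hne h.symm)
  by_contra hc
  have h4 : (m / i) * (m / i) ≤ Nat.sqrt m * Nat.sqrt m :=
    Nat.mul_le_mul (by omega) (by omega)
  nlinarith

-- the √m paired scan sums any weight w over all divisors of m
theorem pv_pair_sum (m : ℕ) (hm : 0 < m) (w : ℕ → ℕ) :
    ∑ i ∈ Finset.Icc 1 (Nat.sqrt m),
      ((if m % i = 0 then w i else 0) + (if m % i = 0 ∧ m / i ≠ i then w (m / i) else 0))
    = ∑ d ∈ m.divisors, w d := by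
  have hset1 : (Finset.Icc 1 (Nat.sqrt m)).filter (fun i => m % i = 0)
      = m.divisors.filter (fun d => d ≤ Nat.sqrt m) := by
    ext d
    simp only [Finset.mem_filter, Finset.mem_Icc, Nat.mem_divisors]
    constructor
    · rintro ⟨⟨-, h2⟩, h3⟩
      exact ⟨⟨Nat.dvd_of_mod_eq_zero h3, hm.ne'⟩, h2⟩
    · rintro ⟨⟨h1, -⟩, h3⟩
      exact ⟨⟨Nat.pos_of_dvd_of_pos h1 hm, h3⟩, pv_mod_eq_zero m d h1⟩
  have hpart1 : (∑ i ∈ Finset.Icc 1 (Nat.sqrt m), if m % i = 0 then w i else 0)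
      = ∑ d ∈ m.divisors with d ≤ Nat.sqrt m, w d := by
    rw [← Finset.sum_filter, hset1]
  have hpart2 : (∑ i ∈ Finset.Icc 1 (Nat.sqrt m), if m % i = 0 ∧ m / i ≠ i then w (m / i) else 0)
      = ∑ d ∈ m.divisors with ¬ d ≤ Nat.sqrt m, w d := by
    rw [← Finset.sum_filter]
    symm
    refine Finset.sum_nbij' (fun d => m / d) (fun i => m / i) ?_ ?_ ?_ ?_ ?_
    · intro d hd
      simp only [Finset.mem_filter, Nat.mem_divisors, Finset.mem_Icc, not_le] at hd ⊢
      obtain ⟨⟨hdvd, -⟩, hgt⟩ := hd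
      have hdpos : 0 < d := Nat.pos_of_dvd_of_pos hdvd hm
      have hdle : d ≤ m := Nat.le_of_dvd hm hdvd
      have hdd : m / (m / d) = d := Nat.div_div_self hdvd hm.ne'
      refine ⟨⟨(Nat.one_le_div_iff hdpos).mpr hdle, pv_div_le_sqrt m d hdvd hgt⟩,
        pv_mod_eq_zero m (m / d) (pv_div_dvd m d hdvd), ?_⟩
      rw [hdd]
      have h5 := pv_div_le_sqrt m d hdvd hgt
      omega
    · intro i hi
      simp only [Finset.mem_filter, Nat.mem_divisors, Finset.mem_Icc, not_le] at hi ⊢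
      obtain ⟨⟨h1i, hile⟩, hmod, hne⟩ := hi
      have hidvd : i ∣ m := Nat.dvd_of_mod_eq_zero hmod
      exact ⟨⟨pv_div_dvd m i hidvd, hm.ne'⟩,
        pv_sqrt_lt_div m i hidvd (by omega) hile hne⟩
    · intro d hd
      simp only [Finset.mem_filter, Nat.mem_divisors] at hd
      exact Nat.div_div_self hd.1.1 hm.ne'
    · intro i hi
      simp only [Finset.mem_filter, Finset.mem_Icc] at hi
      exact Nat.div_div_self (Nat.dvd_of_mod_eq_zero hi.2.1) hm.ne'
    · intro d hd
      simp only [Finset.mem_filter, Nat.mem_divisors] at hd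
      rw [Nat.div_div_self hd.1.1 hm.ne']
  calc ∑ i ∈ Finset.Icc 1 (Nat.sqrt m),
        ((if m % i = 0 then w i else 0) + (if m % i = 0 ∧ m / i ≠ i then w (m / i) else 0))
      = (∑ i ∈ Finset.Icc 1 (Nat.sqrt m), if m % i = 0 then w i else 0) +
        (∑ i ∈ Finset.Icc 1 (Nat.sqrt m), if m % i = 0 ∧ m / i ≠ i then w (m / i) else 0) :=
        Finset.sum_add_distrib
    _ = (∑ d ∈ m.divisors with d ≤ Nat.sqrt m, w d) +
        (∑ d ∈ m.divisors with ¬ d ≤ Nat.sqrt m, w d) := by rw [hpart1, hpart2]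
    _ = ∑ d ∈ m.divisors, w d := Finset.sum_filter_add_sum_filter_not _ _ _

-- A's loop sums pvHEv over all divisors of m
theorem pv_sumA (m : ℕ) (hm : 0 < m) :
    ∑ i ∈ Finset.Icc 1 (Nat.sqrt m), pvATerm m i = ∑ d ∈ m.divisors, pvHEv d := by
  rw [← pv_pair_sum m hm pvHEv]
  refine Finset.sum_congr rfl (fun i _ => ?_)
  simp only [pvATerm, pvHEv]
  by_cases h1 : m % i = 0 <;> by_cases h2 : i % 2 = 0 <;>
    by_cases h3 : (m / i) % 2 = 0 <;> by_cases h4 : m / i = i <;>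
      simp [h1, h2, h3, h4]

-- B's loop sums the identity weight over all divisors of h
theorem pv_sumB (h : ℕ) (hh : 0 < h) :
    ∑ i ∈ Finset.Icc 1 (Nat.sqrt h), pvBTerm h i = ∑ d ∈ h.divisors, d := by
  rw [← pv_pair_sum h hh (fun d => d)]
  refine Finset.sum_congr rfl (fun i _ => ?_)
  simp only [pvBTerm]
  by_cases h1 : h % i = 0 <;> by_cases h2 : h / i = i <;> simp [h1, h2]

-- an odd number has no even divisors
theorem pv_odd_sum (m : ℕ) (ho : m % 2 = 1) : ∑ d ∈ m.divisors, pvHEv d = 0 := by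
  refine Finset.sum_eq_zero ?_
  intro d hd
  rw [Nat.mem_divisors] at hd
  by_cases h2 : d % 2 = 0
  · exfalso
    have hdm : (2:ℕ) ∣ m := dvd_trans (Nat.dvd_of_mod_eq_zero h2) hd.1
    have := pv_mod_eq_zero m 2 hdm
    omega
  · simp [pvHEv, h2]

-- for even m, the even divisors of m are exactly the doubles of the divisors of m / 2
theorem pv_even_sum (m : ℕ) (hm : 0 < m) (he : m % 2 = 0) :
    ∑ d ∈ m.divisors, pvHEv d = 2 * ∑ e ∈ (m / 2).divisors, e := by
  have hm2 : 2 * (m / 2) = m := by omega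
  have hR : ∑ d ∈ m.divisors, pvHEv d = ∑ d ∈ m.divisors with d % 2 = 0, d := by
    rw [Finset.sum_filter]; exact Finset.sum_congr rfl (fun d _ => rfl)
  rw [hR, Finset.mul_sum]
  symm
  refine Finset.sum_nbij' (fun e => 2 * e) (fun d => d / 2) ?_ ?_ ?_ ?_ ?_
  · intro e he'
    simp only [Nat.mem_divisors, Finset.mem_filter] at he' ⊢
    obtain ⟨⟨c, hc⟩, -⟩ := he'
    refine ⟨⟨⟨c, ?_⟩, hm.ne'⟩, by omega⟩
    calc m = 2 * (m / 2) := hm2.symm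
      _ = 2 * (e * c) := by rw [hc]
      _ = 2 * e * c := by ring
  · intro d hd
    simp only [Nat.mem_divisors, Finset.mem_filter] at hd ⊢
    obtain ⟨⟨⟨k, hk⟩, -⟩, hdev⟩ := hd
    have hd2 : 2 * (d / 2) = d := by omega
    refine ⟨⟨k, ?_⟩, by omega⟩
    have hmul : 2 * (m / 2) = 2 * (d / 2 * k) := by
      calc 2 * (m / 2) = m := hm2
        _ = d * k := hk
        _ = 2 * (d / 2) * k := by rw [hd2]
        _ = 2 * (d / 2 * k) := by ring
    exact Nat.eq_of_mul_eq_mul_left (by norm_num) hmul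
  · intro e _
    show 2 * e / 2 = e
    omega
  · intro d hd
    simp only [Finset.mem_filter] at hd
    show 2 * (d / 2) = d
    omega
  · intro e _; rfl

-- ===== VERDICT (by name: the statement is the Claim_ definition above) =====
theorem sum_of_even_factors_spec : Claim_equal_sum_of_even_factors := by
  intro n _
  unfold Spec_sum_of_even_factors sum_of_even_factors sum_of_even_factors_alt
  by_cases hn : n ≤ 0
  · simp [hn]
  · have hn0 : 0 < n := by omega
    set m : ℕ := n.toNat with hm
    have hmn : (m : Int) = n := Int.toNat_of_nonneg (by omega)
    have hmpos : 0 < m := by omega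
    have h2c : (2 : Int) = ((2 : ℕ) : Int) := by norm_num
    have hmod2 : PySem.Int.mod n 2 = ((m % 2 : ℕ) : Int) := by
      rw [← hmn, h2c, pv_cast_mod]
    rw [if_neg hn]
    -- A side: reduce the fold to the even-divisor sum of m
    have hfunA : (fun (sum_even i : Int) =>
        if PySem.Int.mod n i = 0 then
          let sum_even := if PySem.Int.mod i 2 = 0 then sum_even + i else sum_even
          if PySem.Int.mod (PySem.Int.floordiv n i) 2 = 0 ∧ PySem.Int.floordiv n i ≠ i
          then sum_even + PySem.Int.floordiv n i else sum_even
        else sum_even)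
        = (fun (s i : Int) => s +
            (if PySem.Int.mod n i = 0 then
              (if PySem.Int.mod i 2 = 0 then i else 0) +
              (if PySem.Int.mod (PySem.Int.floordiv n i) 2 = 0 ∧ PySem.Int.floordiv n i ≠ i
               then PySem.Int.floordiv n i else 0)
             else 0)) := by
      funext s i
      split_ifs <;> ring
    have htA : ∀ k : ℕ,
        (if PySem.Int.mod n (1 + (k:Int)) = 0 then
          (if PySem.Int.mod (1 + (k:Int)) 2 = 0 then (1 + (k:Int)) else 0) +
          (if PySem.Int.mod (PySem.Int.floordiv n (1 + (k:Int))) 2 = 0 ∧ PySem.Int.floordiv n (1 + (k:Int)) ≠ (1 + (k:Int))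
           then PySem.Int.floordiv n (1 + (k:Int)) else 0)
         else 0)
        = ((pvATerm m (k + 1) : ℕ) : Int) := by
      intro k
      have h1 : (1 + (k:Int)) = ((k + 1 : ℕ) : Int) := by push_cast; ring
      rw [h1, ← hmn, h2c]
      simp only [pv_cast_div, pv_cast_mod]
      simp only [ne_eq, Nat.cast_eq_zero, Nat.cast_inj, pvATerm]
      split_ifs <;> push_cast <;> ring
    have hsum : ∀ (t : ℕ) (g : ℕ → ℕ),
        ((List.range t).map (fun k => ((g k : ℕ) : Int))).sum = ((∑ k ∈ Finset.range t, g k : ℕ) : Int) := by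
      intro t g
      have h : ((List.range t).map (fun k => ((g k : ℕ) : Int))).sum = ∑ k ∈ Finset.range t, ((g k : ℕ) : Int) := rfl
      rw [h, Nat.cast_sum]
    have hcA : ((Nat.sqrt m : Int) + 1 - 1).toNat = Nat.sqrt m := by omega
    have hAside : (PySem.List.pyRange 1 ((Nat.sqrt n.toNat : Int) + 1) 1).foldl
        (fun sum_even i =>
          if PySem.Int.mod n i = 0 then
            let sum_even := if PySem.Int.mod i 2 = 0 then sum_even + i else sum_even
            if PySem.Int.mod (PySem.Int.floordiv n i) 2 = 0 ∧ PySem.Int.floordiv n i ≠ i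
            then sum_even + PySem.Int.floordiv n i else sum_even
          else sum_even) 0
        = ((∑ d ∈ m.divisors, pvHEv d : ℕ) : Int) := by
      rw [hfunA, PySem.List.foldl_add, zero_add, PySem.List.pyRange_one, hcA, List.map_map]
      simp only [Function.comp_def, htA]
      rw [hsum _ (fun k => pvATerm m (k + 1))]
      have := pv_sumA m hmpos
      rw [← pv_range_shift (Nat.sqrt m) (fun i => pvATerm m i)] at this
      exact_mod_cast this
    rw [hAside]
    by_cases hev : m % 2 = 0
    · -- even n: B's guard is false; reduce B's fold to σ(m/2)
      have hnot : ¬ (n ≤ 0 ∨ PySem.Int.mod n 2 ≠ 0) := by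
        rw [hmod2, hev]
        simp [hn]
      rw [if_neg hnot]
      have hhalf : PySem.Int.floordiv n 2 = ((m / 2 : ℕ) : Int) := by
        rw [← hmn, h2c, pv_cast_div]
      have hHpos : 0 < m / 2 := by omega
      simp only [hhalf]
      have hfunB : (fun (total i : Int) =>
          if PySem.Int.mod ((m / 2 : ℕ) : Int) i = 0 then
            let total := total + i
            if PySem.Int.floordiv ((m / 2 : ℕ) : Int) i ≠ i
            then total + PySem.Int.floordiv ((m / 2 : ℕ) : Int) i else total
          else total)
          = (fun (s i : Int) => s +
              (if PySem.Int.mod ((m / 2 : ℕ) : Int) i = 0 then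
                i + (if PySem.Int.floordiv ((m / 2 : ℕ) : Int) i ≠ i
                     then PySem.Int.floordiv ((m / 2 : ℕ) : Int) i else 0)
               else 0)) := by
        funext s i
        split_ifs <;> ring
      have htB : ∀ k : ℕ,
          (if PySem.Int.mod ((m / 2 : ℕ) : Int) (1 + (k:Int)) = 0 then
            (1 + (k:Int)) + (if PySem.Int.floordiv ((m / 2 : ℕ) : Int) (1 + (k:Int)) ≠ (1 + (k:Int))
                 then PySem.Int.floordiv ((m / 2 : ℕ) : Int) (1 + (k:Int)) else 0)
           else 0)
          = ((pvBTerm (m / 2) (k + 1) : ℕ) : Int) := by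
        intro k
        have h1 : (1 + (k:Int)) = ((k + 1 : ℕ) : Int) := by push_cast; ring
        rw [h1]
        simp only [pv_cast_div, pv_cast_mod]
        simp only [ne_eq, Nat.cast_eq_zero, Nat.cast_inj, pvBTerm]
        split_ifs <;> push_cast <;> ring
      have hcB : ((Nat.sqrt (((m / 2 : ℕ) : Int)).toNat : Int) + 1 - 1).toNat = Nat.sqrt (m / 2) := by
        rw [Int.toNat_natCast]
        omega
      rw [hfunB, PySem.List.foldl_add, zero_add, PySem.List.pyRange_one, hcB, List.map_map]
      simp only [Function.comp_def, htB]
      rw [hsum _ (fun k => pvBTerm (m / 2) (k + 1))]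
      have hB := pv_sumB (m / 2) hHpos
      rw [← pv_range_shift (Nat.sqrt (m / 2)) (fun i => pvBTerm (m / 2) i)] at hB
      rw [pv_even_sum m hmpos hev]
      push_cast [hB]
      ring
    · -- odd n: B's guard is true and A's sum is empty
      have hodd : m % 2 = 1 := by omega
      have hyes : (n ≤ 0 ∨ PySem.Int.mod n 2 ≠ 0) := by
        right; rw [hmod2, hodd]; norm_num
      rw [if_pos hyes, pv_odd_sum m hodd]
      norm_num
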